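-- pv_equiv track=rewrite | github.com/HadiHesham/Structured-ASIC-Simulated-Annealing-Placement-Tool | sa.py | build_cell_to_nets
-- ===== SOURCE A (Python) =====
-- def build_cell_to_nets(nets, num_components):
--     cell_to_nets = {}
--     for i in range(num_components):
--         cell_to_nets[i] = []
--
--     for net_index, net in enumerate(nets):
--         for component_id in net:
--             if component_id in cell_to_nets:
--                 cell_to_nets[component_id].append(net_index)
--
--     return cell_to_nets
-- ===== SOURCE B (Python) =====
-- def build_cell_to_nets(nets, num_components):
--     return {i: [net_index
--                 for net_index, net in enumerate(nets)
--                 for component_id in net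
--                 if component_id == i]
--             for i in range(num_components)}
-- ===== Notes on version B (the rewrite author's own statement) =====
-- stated objective: alternative
-- what changed: Replaces the net-major single pass that mutates a prebuilt dict with a cell-major dict comprehension that rescans all nets per cell, collecting matching net indices with an equality filter.
import Mathlib
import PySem

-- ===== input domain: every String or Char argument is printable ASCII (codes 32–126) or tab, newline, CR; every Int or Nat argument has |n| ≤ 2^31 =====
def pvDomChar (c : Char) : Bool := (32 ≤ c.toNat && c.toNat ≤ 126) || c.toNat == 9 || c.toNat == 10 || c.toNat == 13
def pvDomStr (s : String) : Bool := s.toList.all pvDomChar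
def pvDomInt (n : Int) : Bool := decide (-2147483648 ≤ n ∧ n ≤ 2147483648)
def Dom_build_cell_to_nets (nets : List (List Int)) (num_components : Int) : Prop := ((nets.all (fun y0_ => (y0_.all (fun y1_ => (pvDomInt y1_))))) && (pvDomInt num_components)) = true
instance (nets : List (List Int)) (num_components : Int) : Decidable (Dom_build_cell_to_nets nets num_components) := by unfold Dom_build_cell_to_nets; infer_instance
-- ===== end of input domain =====

-- B is a cell-major re-derivation (per-cell rescans of all nets) of A's net-major indexing pass; objective: alternative decomposition, same results.

-- ===== PORT A =====
-- net-major: prebuild dict {0..num_components-1 : []}, then one pass over nets appending net_index under each member key present in the dict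
def build_cell_to_nets (nets : List (List Int)) (num_components : Int) : List (Int × List Int) :=
  let d0 : PySem.Dict Int (List Int) :=
    (PySem.List.pyRange 0 num_components 1).foldl (fun d i => d.insert i ([] : List Int)) PySem.Dict.empty
  let d :=
    (PySem.List.enumerate nets).foldl
      (fun d p =>
        p.2.foldl
          (fun d c => if d.contains c then d.modify c ([] : List Int) (fun v => v ++ [p.1]) else d)
          d)
      d0
  d.items

-- ===== PORT B =====
-- cell-major: for each cell i, rescan all nets collecting net_index per member equal to i
def build_cell_to_nets_alt (nets : List (List Int)) (num_components : Int) : List (Int × List Int) :=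
  (PySem.List.pyRange 0 num_components 1).map (fun i =>
    (i, (PySem.List.enumerate nets).flatMap
          (fun p => (p.2.filter (fun c => c == i)).map (fun _ => p.1))))

-- ===== PRECONDITION & SPEC =====
def Spec_build_cell_to_nets (nets : List (List Int)) (num_components : Int) (out : List (Int × List Int)) : Prop := out = build_cell_to_nets_alt nets num_components
instance (nets : List (List Int)) (num_components : Int) (out : List (Int × List Int)) : Decidable (Spec_build_cell_to_nets nets num_components out) := by unfold Spec_build_cell_to_nets; infer_instance

-- ===== CLAIM (what is proved, stated in full; the proofs are below) =====
def Claim_equal_build_cell_to_nets : Prop := ∀ (nets : List (List Int)) (num_components : Int), Dom_build_cell_to_nets nets num_components → Spec_build_cell_to_nets nets num_components (build_cell_to_nets nets num_components)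

-- ===== LEMMAS AND PROOFS =====

-- the guarded inner loop of A appends ni to every present key's list once per matching member
theorem inner_items (cs : List Int) (ni : Int) (d : PySem.Dict Int (List Int))
    (hnd : d.keys.Nodup) :
    (cs.foldl
      (fun d c => if d.contains c then d.modify c ([] : List Int) (fun v => v ++ [ni]) else d)
      d).items
    = d.items.map (fun q => (q.1, q.2 ++ (cs.filter (fun c => c == q.1)).map (fun _ => ni))) := by
  induction cs generalizing d with
  | nil => simp
  | cons c cs ih =>
    simp only [List.foldl_cons]
    by_cases h : d.contains c = true
    · have hnd' : (d.modify c ([] : List Int) (fun v => v ++ [ni])).keys.Nodup := by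
        rw [PySem.Dict.keys_modify, PySem.Dict.keys_insert_of_contains _ _ h]; exact hnd
      rw [if_pos h, ih _ hnd']
      have hit : (d.modify c ([] : List Int) (fun v => v ++ [ni])).items
          = d.items.map (fun p => if (p.1 == c) = true then (c, d.getD c [] ++ [ni]) else p) := by
        simp only [PySem.Dict.modify]
        exact PySem.Dict.items_insert_of_contains d _ h
      rw [hit, List.map_map]
      refine List.map_congr_left ?_
      intro q hq
      obtain ⟨k, v⟩ := q
      by_cases hc : k = c
      · have hv : d.getD c ([] : List Int) = v := by
          subst hc; exact PySem.Dict.getD_of_mem_items d hq hnd []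
        simp [Function.comp, hc, hv]
      · have hb : (k == c) = false := by simp [hc]
        have hb2 : (c == k) = false := by simp [Ne.symm hc]
        simp [Function.comp, hb, hb2]
    · rw [if_neg (by simp [h] : ¬ d.contains c = true), ih _ hnd]
      refine List.map_congr_left ?_
      intro q hq
      have hk : q.1 ∈ d.keys := PySem.Dict.mem_keys_of_mem_items d hq
      have hc : (c == q.1) = false := by
        refine beq_eq_false_iff_ne.mpr ?_
        intro he
        rw [← PySem.Dict.contains_iff_mem_keys] at hk
        exact absurd (he ▸ hk) (by simp [h])
      simp [hc]

-- the inner loop never changes the key list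
theorem inner_keys (cs : List Int) (ni : Int) (d : PySem.Dict Int (List Int))
    (hnd : d.keys.Nodup) :
    (cs.foldl
      (fun d c => if d.contains c then d.modify c ([] : List Int) (fun v => v ++ [ni]) else d)
      d).keys = d.keys := by
  simp only [PySem.Dict.keys, inner_items cs ni d hnd, List.map_map]
  rfl

-- A's whole net-major pass, seen from each key's final list
theorem outer_items (l : List (Int × List Int)) (d : PySem.Dict Int (List Int))
    (hnd : d.keys.Nodup) :
    (l.foldl
      (fun d p =>
        p.2.foldl
          (fun d c => if d.contains c then d.modify c ([] : List Int) (fun v => v ++ [p.1]) else d)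
          d)
      d).items
    = d.items.map (fun q =>
        (q.1, q.2 ++ l.flatMap (fun p => (p.2.filter (fun c => c == q.1)).map (fun _ => p.1)))) := by
  induction l generalizing d with
  | nil => simp
  | cons p l ih =>
    simp only [List.foldl_cons]
    have hnd' :
        (p.2.foldl
          (fun d c => if d.contains c then d.modify c ([] : List Int) (fun v => v ++ [p.1]) else d)
          d).keys.Nodup := by
      rw [inner_keys p.2 p.1 d hnd]; exact hnd
    rw [ih _ hnd', inner_items p.2 p.1 d hnd, List.map_map]
    refine List.map_congr_left ?_
    intro q _
    simp [Function.comp, List.append_assoc]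

-- ===== VERDICT (by name: the statement is the Claim_ definition above) =====
theorem build_cell_to_nets_spec : Claim_equal_build_cell_to_nets := by
  intro nets n _
  unfold Spec_build_cell_to_nets build_cell_to_nets build_cell_to_nets_alt
  have hd0 : ((PySem.List.pyRange 0 n 1).foldl (fun d i => d.insert i ([] : List Int))
        PySem.Dict.empty).items
      = (PySem.List.pyRange 0 n 1).map (fun i => (i, ([] : List Int))) := by
    have h := PySem.Dict.items_foldl_insert_fresh (PySem.List.pyRange 0 n 1)
      (fun i => i) (fun _ => ([] : List Int)) PySem.Dict.empty
      (fun a _ => PySem.Dict.contains_empty a)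
      (by simpa using PySem.List.nodup_pyRange_one 0 n)
    simpa using h
  have hnd0 : ((PySem.List.pyRange 0 n 1).foldl (fun d i => d.insert i ([] : List Int))
        PySem.Dict.empty).keys.Nodup := by
    simp only [PySem.Dict.keys, hd0, List.map_map]
    have hcomp : (fun x : Int × List Int => x.1) ∘ (fun i : Int => (i, ([] : List Int))) = id := rfl
    rw [hcomp, List.map_id]
    exact PySem.List.nodup_pyRange_one 0 n
  rw [outer_items _ _ hnd0, hd0, List.map_map]
  simp [Function.comp]
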